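-- pv_equiv track=rewrite | github.com/d-babel/CS1 | 2324/chapter5/examples/dna/ddna.py | original_longest_run
-- ===== SOURCE A (Python) =====
-- def original_longest_run(sequence, str_key):
--     max_count = 0
--     n = len(str_key)
--     for i in range(len(sequence)):
--         count = 0
--         while sequence[i + n * count: i + n * (count + 1)] == str_key:
--             count += 1
--         max_count = max(max_count, count)
--     return max_count
-- ===== SOURCE B (Python) =====
-- def original_longest_run(sequence, str_key):
--     # DP from the right: a match at i extends the run that starts n positions later.
--     n = len(str_key)
--     best = 0
--     run = {}
--     for i in range(len(sequence) - 1, -1, -1):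
--         if sequence.startswith(str_key, i):
--             r = 1 + run.get(i + n, 0)
--             run[i] = r
--             if r > best:
--                 best = r
--     return best
-- ===== Notes on version B (the rewrite author's own statement) =====
-- stated objective: faster
-- what changed: Replaces A's per-position rescan (a while loop re-slicing and re-matching the key from every start index) by a single right-to-left DP pass that memoises run lengths in a dict (run[i] = 1 + run.get(i+n, 0) on a startswith match), so each position does one copy-free prefix test; Pre_ only excludes an empty str_key with a nonempty sequence, where A loops forever.
import Mathlib
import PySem

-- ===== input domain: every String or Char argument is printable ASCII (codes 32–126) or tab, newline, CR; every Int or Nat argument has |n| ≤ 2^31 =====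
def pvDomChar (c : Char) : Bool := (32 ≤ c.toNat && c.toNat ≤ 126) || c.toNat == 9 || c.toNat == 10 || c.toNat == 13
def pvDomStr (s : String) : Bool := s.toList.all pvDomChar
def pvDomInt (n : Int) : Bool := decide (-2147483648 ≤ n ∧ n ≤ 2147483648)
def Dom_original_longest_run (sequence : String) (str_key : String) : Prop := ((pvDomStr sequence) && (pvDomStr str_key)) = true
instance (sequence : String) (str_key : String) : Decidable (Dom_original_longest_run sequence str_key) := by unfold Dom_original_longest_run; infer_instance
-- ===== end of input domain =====

-- B replaces A's per-position rescan by one right-to-left DP pass with a sliding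
-- window of the next n run lengths (objective: faster).


-- ===== PORT A =====
-- inner 'while' loop of A; the fuel argument only makes the recursion total
-- (inside Pre_ the loop makes at most seq.length steps, so fuel seq.length + 1 never runs out)
def aWhile (seq key : List Char) (i n count fuel : Nat) : Nat :=
  match fuel with
  | 0 => count
  | f + 1 =>
    if PySem.List.slice seq (some ((i + n * count : Nat) : Int)) (some ((i + n * (count + 1) : Nat) : Int)) = key
    then aWhile seq key i n (count + 1) f
    else count

def original_longest_run (sequence : String) (str_key : String) : Int :=
  let seq := sequence.toList
  let key := str_key.toList
  let n := key.length
  (List.range seq.length).foldl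
    (fun max_count i => max max_count ((aWhile seq key i n 0 (seq.length + 1) : Nat) : Int)) 0

-- ===== PORT B =====
def original_longest_run_alt (sequence : String) (str_key : String) : Int :=
  let seq := sequence.toList
  let key := str_key.toList
  let n := key.length
  let st := (PySem.List.pyRange ((seq.length : Int) - 1) (-1) (-1)).foldl
    (fun (st : Int × PySem.Dict Int Int) i =>
      -- sequence.startswith(str_key, i): exact for 0 ≤ i (prefix test on the tail from i)
      if PySem.Chars.startswith (PySem.List.slice seq (some i) none) key then
        let r : Int := 1 + st.2.getD (i + (n : Int)) 0
        (if r > st.1 then r else st.1, st.2.insert i r)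
      else st)
    (0, PySem.Dict.empty)
  st.1

-- ===== PRECONDITION & SPEC =====
-- Pre_ excludes only an empty str_key together with a nonempty sequence: there A's
-- inner while loop matches the empty slice forever and never returns.
def Pre_original_longest_run (sequence : String) (str_key : String) : Prop :=
  str_key ≠ "" ∨ sequence = ""
instance (sequence : String) (str_key : String) : Decidable (Pre_original_longest_run sequence str_key) := by
  unfold Pre_original_longest_run; infer_instance
def pvWitness_original_longest_run : String × String := ("ATATAG", "AT")
def Spec_original_longest_run (sequence : String) (str_key : String) (out : Int) : Prop := out = original_longest_run_alt sequence str_key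
instance (sequence : String) (str_key : String) (out : Int) : Decidable (Spec_original_longest_run sequence str_key out) := by unfold Spec_original_longest_run; infer_instance

-- ===== CLAIM (what is proved, stated in full; the proofs are below) =====
def Claim_equal_original_longest_run : Prop := ∀ (sequence : String) (str_key : String), Dom_original_longest_run sequence str_key → Pre_original_longest_run sequence str_key → Spec_original_longest_run sequence str_key (original_longest_run sequence str_key)

-- ===== LEMMAS AND PROOFS =====

-- the aligned run length starting at i (fuel-indexed; fuel ≥ seq.length + 1 - i suffices)
def rlen (seq key : List Char) : Nat → Nat → Nat
  | 0, _ => 0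
  | f + 1, i =>
    if PySem.List.slice seq (some (i : Int)) (some ((i + key.length : Nat) : Int)) = key
    then 1 + rlen seq key f (i + key.length) else 0

def matchAt (seq key : List Char) (i : Nat) : Prop :=
  PySem.List.slice seq (some (i : Int)) (some ((i + key.length : Nat) : Int)) = key

theorem matchAt_bound {seq key : List Char} {i : Nat} (hn : 1 ≤ key.length)
    (h : matchAt seq key i) : i + key.length ≤ seq.length := by
  unfold matchAt at h
  rw [PySem.List.slice_natCast] at h
  have hlen : (List.take (i + key.length - i) (List.drop i seq)).length = key.length := by
    rw [h]
  simp [List.length_take, List.length_drop] at hlen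
  omega

theorem not_matchAt_of_ge {seq key : List Char} {i : Nat} (hn : 1 ≤ key.length)
    (h : seq.length ≤ i) : ¬ matchAt seq key i := by
  intro hm
  have := matchAt_bound hn hm
  omega

-- fuel irrelevance
theorem rlen_fuel {seq key : List Char} (hn : 1 ≤ key.length) :
    ∀ (f1 f2 i : Nat), seq.length - i < f1 → seq.length - i < f2 →
      rlen seq key f1 i = rlen seq key f2 i := by
  intro f1
  induction f1 with
  | zero => intro f2 i h1 h2; omega
  | succ f ih =>
    intro f2 i h1 h2
    match f2, h2 with
    | g + 1, h2 =>
      simp only [rlen]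
      by_cases hm : matchAt seq key i
      · have hb := matchAt_bound hn hm
        unfold matchAt at hm
        rw [if_pos hm, if_pos hm, ih g (i + key.length) (by omega) (by omega)]
      · unfold matchAt at hm
        rw [if_neg hm, if_neg hm]

def R (seq key : List Char) (i : Nat) : Nat := rlen seq key (seq.length + 1) i

theorem R_eq {seq key : List Char} (hn : 1 ≤ key.length) (i : Nat) :
    R seq key i
      = if PySem.List.slice seq (some (i : Int)) (some ((i + key.length : Nat) : Int)) = key
        then 1 + R seq key (i + key.length) else 0 := by
  unfold R
  have h : rlen seq key (seq.length + 1) i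
      = if PySem.List.slice seq (some (i : Int)) (some ((i + key.length : Nat) : Int)) = key
        then 1 + rlen seq key seq.length (i + key.length) else 0 := rfl
  rw [h]
  by_cases hm : PySem.List.slice seq (some (i : Int)) (some ((i + key.length : Nat) : Int)) = key
  · have hb := matchAt_bound hn hm
    rw [if_pos hm, if_pos hm,
      rlen_fuel hn seq.length (seq.length + 1) (i + key.length) (by omega) (by omega)]
  · rw [if_neg hm, if_neg hm]

theorem R_zero_of_ge {seq key : List Char} (hn : 1 ≤ key.length) {i : Nat}
    (h : seq.length ≤ i) : R seq key i = 0 := by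
  have hm := not_matchAt_of_ge hn h
  unfold matchAt at hm
  rw [R_eq hn, if_neg hm]

-- A's while loop computes R
theorem aWhile_eq {seq key : List Char} (hn : 1 ≤ key.length) (i : Nat) :
    ∀ (f count : Nat), seq.length - (i + key.length * count) < f →
      aWhile seq key i key.length count f = count + R seq key (i + key.length * count) := by
  intro f
  induction f with
  | zero => intro count h; omega
  | succ f ih =>
    intro count h
    have hcast : ((i + key.length * (count + 1) : Nat) : Int)
        = (((i + key.length * count) + key.length : Nat) : Int) := by
      push_cast; ring
    simp only [aWhile, hcast]
    by_cases hm : matchAt seq key (i + key.length * count)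
    · have hb := matchAt_bound hn hm
      unfold matchAt at hm
      rw [if_pos hm, ih (count + 1) (by omega)]
      rw [R_eq hn (i + key.length * count), if_pos hm]
      have heq : i + key.length * (count + 1) = i + key.length * count + key.length := by ring
      rw [heq]
      omega
    · unfold matchAt at hm
      rw [if_neg hm, R_eq hn (i + key.length * count), if_neg hm]
      omega

-- max-fold helpers
theorem foldl_max_shift (f : Nat → Int) (l : List Nat) :
    ∀ (b x : Int), l.foldl (fun a j => max a (f j)) (max b x)
      = max (l.foldl (fun a j => max a (f j)) b) x := by
  induction l with
  | nil => intro b x; rfl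
  | cons y l ih =>
    intro b x
    simp only [List.foldl_cons]
    rw [max_right_comm b x (f y)]
    exact ih (max b (f y)) x

theorem foldl_max_reverse (f : Nat → Int) (l : List Nat) :
    ∀ (b : Int), l.reverse.foldl (fun a j => max a (f j)) b
      = l.foldl (fun a j => max a (f j)) b := by
  induction l with
  | nil => intro b; rfl
  | cons y l ih =>
    intro b
    rw [List.reverse_cons, List.foldl_append, ih b]
    simp only [List.foldl_cons, List.foldl_nil]
    rw [← foldl_max_shift]

-- the match condition of B, reduced to the slice equation of A
theorem startswith_eq_match (seq key : List Char) (i : Nat) :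
    (PySem.Chars.startswith (PySem.List.slice seq (some (Int.ofNat i)) none) key = true)
      ↔ PySem.List.slice seq (some (i : Int)) (some ((i + key.length : Nat) : Int)) = key := by
  have h1 : (Int.ofNat i) = ((i : Nat) : Int) := by simp only [Int.ofNat_eq_natCast]
  rw [h1, PySem.List.slice_from_natCast, PySem.Chars.startswith_iff,
    List.prefix_iff_eq_take]
  have h2 : ((i + key.length : Nat) : Int) = ((i : Nat) : Int) + ((key.length : Nat) : Int) := by
    push_cast; ring
  rw [h2, PySem.List.slice_natCast_add]
  constructor
  · intro h; exact h.symm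
  · intro h; exact h.symm

-- the dictionary invariant of B's loop: run.get(j, 0) is the run length at j for positions ≥ i
def Dinv (seq key : List Char) (i : Nat) (d : PySem.Dict Int Int) : Prop :=
  ∀ j : Int, d.getD j 0
    = if (i : Int) ≤ j ∧ j < (seq.length : Int) then ((R seq key j.toNat : Nat) : Int) else 0

-- B's loop body as a named function (definitionally equal to the lambda in the port)
def bStep (seq key : List Char) (st : Int × PySem.Dict Int Int) (i : Int) : Int × PySem.Dict Int Int :=
  if PySem.Chars.startswith (PySem.List.slice seq (some i) none) key then
    let r : Int := 1 + st.2.getD (i + (key.length : Int)) 0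
    (if r > st.1 then r else st.1, st.2.insert i r)
  else st

theorem if_lt_eq_max (b r : Int) : (if r > b then r else b) = max b r := by
  rw [max_def]
  split_ifs <;> omega

theorem B_step {seq key : List Char} (hn : 1 ≤ key.length) {i : Nat} (him : i < seq.length)
    {b : Int} (hb : 0 ≤ b) (d : PySem.Dict Int Int) (hd : Dinv seq key (i + 1) d) :
    (bStep seq key (b, d) (Int.ofNat i)).1 = max b ((R seq key i : Nat) : Int)
      ∧ Dinv seq key i (bStep seq key (b, d) (Int.ofNat i)).2 := by
  have h1 : (Int.ofNat i) = ((i : Nat) : Int) := by simp only [Int.ofNat_eq_natCast]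
  unfold bStep
  by_cases hm : PySem.List.slice seq (some (i : Int)) (some ((i + key.length : Nat) : Int)) = key
  · rw [if_pos ((startswith_eq_match seq key i).mpr hm)]
    have hcast : (Int.ofNat i) + ((key.length : Nat) : Int) = ((i + key.length : Nat) : Int) := by
      rw [h1]; push_cast; ring
    have hr : (1 + d.getD ((Int.ofNat i) + ((key.length : Nat) : Int)) 0)
        = ((R seq key i : Nat) : Int) := by
      rw [hcast, hd ((i + key.length : Nat) : Int)]
      rw [R_eq hn i, if_pos hm]
      by_cases hlt : ((i + key.length : Nat) : Int) < (seq.length : Int)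
      · rw [if_pos ⟨by push_cast; omega, hlt⟩]
        simp only [Int.toNat_natCast]
        push_cast
        all_goals omega
      · rw [if_neg (by intro hc; exact hlt hc.2)]
        rw [R_zero_of_ge hn (i := i + key.length) (by omega)]
        push_cast
    rw [hr]
    constructor
    · exact if_lt_eq_max b _
    · intro j
      rw [PySem.Dict.getD_insert, h1]
      by_cases hji : j = ((i : Nat) : Int)
      · rw [if_pos hji, if_pos (by constructor <;> omega), hji]
        simp only [Int.toNat_natCast]
      · rw [if_neg hji, hd j]
        split_ifs with hc1 hc2
        · rfl
        · exfalso; omega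
        · exfalso; omega
        · rfl
  · rw [if_neg (by rw [startswith_eq_match seq key i]; exact hm)]
    have hR0 : R seq key i = 0 := by rw [R_eq hn, if_neg hm]
    constructor
    · simp only [hR0, Nat.cast_zero]
      exact (max_eq_left hb).symm
    · intro j
      rw [hd j]
      by_cases hji : j = ((i : Nat) : Int)
      · rw [if_neg (by omega), if_pos (by constructor <;> omega), hji]
        simp only [Int.toNat_natCast]
        rw [hR0]
        rfl
      · split_ifs with hc1 hc2
        · rfl
        · exfalso; omega
        · exfalso; omega
        · rfl

-- B's fold over the reversed index list, from position i down to 0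
theorem B_loop {seq key : List Char} (hn : 1 ≤ key.length) :
    ∀ (i : Nat), i ≤ seq.length → ∀ (b : Int), 0 ≤ b → ∀ (d : PySem.Dict Int Int), Dinv seq key i d →
      (((List.range i).reverse.map Int.ofNat).foldl (bStep seq key) (b, d)).1
      = (List.range i).reverse.foldl (fun a j => max a ((R seq key j : Nat) : Int)) b := by
  intro i
  induction i with
  | zero => intro _ b _ d _; rfl
  | succ i ih =>
    intro hle b hb d hd
    rw [List.range_succ, List.reverse_append, List.reverse_singleton, List.singleton_append,
      List.map_cons, List.foldl_cons, List.foldl_cons]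
    obtain ⟨h1, h2⟩ := B_step hn (by omega : i < seq.length) hb d hd
    have hpair : bStep seq key (b, d) (Int.ofNat i)
        = ((bStep seq key (b, d) (Int.ofNat i)).1, (bStep seq key (b, d) (Int.ofNat i)).2) := rfl
    rw [hpair, h1]
    exact ih (by omega) _ (le_trans hb (le_max_left _ _)) _ h2

-- ===== VERDICT (by name: the statement is the Claim_ definition above) =====
theorem original_longest_run_spec : Claim_equal_original_longest_run := by
  intro sequence str_key _ hpre
  unfold Spec_original_longest_run original_longest_run original_longest_run_alt
  simp only []
  set seq := sequence.toList with hseq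
  set key := str_key.toList with hkey
  by_cases hm0 : seq.length = 0
  · -- empty sequence: both folds are over the empty list
    rw [hm0]
    rw [PySem.List.pyRange_neg_one_eq_nil (by norm_num)]
    rfl
  · have hn : 1 ≤ key.length := by
      rcases hpre with h | h
      · have hne : key ≠ [] := by
          rw [hkey]
          simp only [ne_eq, String.toList_eq_nil_iff]
          exact h
        have h0 : key.length ≠ 0 := by
          simpa [List.length_eq_zero_iff] using hne
        omega
      · exfalso
        apply hm0
        rw [hseq, h]
        rfl
    -- A side
    have hA : (List.range seq.length).foldl
        (fun max_count i => max max_count ((aWhile seq key i key.length 0 (seq.length + 1) : Nat) : Int)) 0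
        = (List.range seq.length).foldl (fun a j => max a ((R seq key j : Nat) : Int)) 0 := by
      have hfun : (fun (max_count : Int) (i : Nat) =>
            max max_count ((aWhile seq key i key.length 0 (seq.length + 1) : Nat) : Int))
          = (fun a j => max a ((R seq key j : Nat) : Int)) := by
        funext a i
        rw [aWhile_eq hn i (seq.length + 1) 0 (by omega)]
        norm_num
      rw [hfun]
    rw [hA]
    -- B side
    have hrange : PySem.List.pyRange ((seq.length : Int) - 1) (-1) (-1)
        = ((List.range seq.length).map Int.ofNat).reverse := by
      rw [PySem.List.pyRange_neg_one_eq_reverse]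
      norm_num
      rw [PySem.List.pyRange_zero_nat]
      simp [Int.ofNat_eq_natCast]
    have hDinv0 : Dinv seq key seq.length PySem.Dict.empty := by
      intro j
      rw [PySem.Dict.getD_empty]
      rw [if_neg (by omega)]
    rw [hrange, ← List.map_reverse]
    exact ((foldl_max_reverse (fun j => ((R seq key j : Nat) : Int)) (List.range seq.length) 0).symm.trans
      (B_loop hn seq.length (le_refl _) 0 (le_refl 0) PySem.Dict.empty hDinv0).symm)
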